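-- pv_equiv track=rewrite | github.com/PacifistaPx0/CodeWars | 6th Kyu/checkouttill.py | queue_time
-- ===== SOURCE A (Python) =====
-- def queue_time(customers, n):
--     new=[]
--     for i in range(n):
--         new.append(0)
--     for i in customers:
--         new.sort()
--         new[0] += i
--     return max(new)
-- ===== SOURCE B (Python) =====
-- def queue_time(customers, n):
--     # Keep the till loads as a sorted list: pop the least-loaded till from the
--     # front, add the customer, and re-insert at the position found by binary
--     # search; the last element is then the total queue time.
--     tills = [0] * n
--     for c in customers:
--         t = tills.pop(0) + c
--         lo, hi = 0, len(tills)
--         while lo < hi: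
--             mid = (lo + hi) // 2
--             if tills[mid] < t:
--                 lo = mid + 1
--             else:
--                 hi = mid
--         tills.insert(lo, t)
--     return tills[-1]
-- ===== Notes on version B (the rewrite author's own statement) =====
-- stated objective: faster
-- what changed: Instead of fully re-sorting the load list before every customer and scanning it for the max at the end, B keeps the loads in a sorted list throughout: it pops the minimum from the front, binary-searches the insertion point for the updated load, and returns the last element.
import Mathlib
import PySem

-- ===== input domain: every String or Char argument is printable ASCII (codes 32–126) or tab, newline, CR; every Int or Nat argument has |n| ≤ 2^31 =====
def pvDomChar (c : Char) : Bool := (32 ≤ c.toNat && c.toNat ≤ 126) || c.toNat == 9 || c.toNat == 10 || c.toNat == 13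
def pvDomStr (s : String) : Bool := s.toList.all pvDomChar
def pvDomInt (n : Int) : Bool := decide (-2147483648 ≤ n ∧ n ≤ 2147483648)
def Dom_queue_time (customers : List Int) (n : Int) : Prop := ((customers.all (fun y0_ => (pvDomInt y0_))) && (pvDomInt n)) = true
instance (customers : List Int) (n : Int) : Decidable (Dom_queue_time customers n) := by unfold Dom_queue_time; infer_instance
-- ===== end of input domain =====

-- B keeps the till loads as a sorted list (pop min at front, binary-search the
-- insertion point, answer = last element) instead of re-sorting before every
-- customer and taking max at the end; measurably faster by a constant factor.


-- ===== PORT A =====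
-- body of A's customer loop: new.sort(); new[0] += i
def qtStepA (new : List Int) (i : Int) : List Int :=
  -- new.sort(): Python's stdlib stable sort, ported as the stdlib stable
  -- List.mergeSort (on Int the resulting list is the sorted rearrangement)
  match new.mergeSort (fun x y => decide (x ≤ y)) with
  | [] => []                 -- new[0] += i raises IndexError here (excluded by Pre_)
  | h :: t => (h + i) :: t

def queue_time (customers : List Int) (n : Int) : Int :=
  -- new=[]; for i in range(n): new.append(0)
  -- (append modelled by cons + one final reverse: the same list at loop exit,
  --  evaluable in O(n) where repeated '++ [0]' would be quadratic)
  let new0 : List Int := ((PySem.List.pyRange 0 n 1).foldl (fun acc _ => (0 : Int) :: acc) []).reverse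
  -- for i in customers: new.sort(); new[0] += i
  let new1 : List Int := customers.foldl qtStepA new0
  -- return max(new)   (max([]) raises ValueError; excluded by Pre_)
  (PySem.List.max? new1 (fun x => x)).getD 0

-- ===== PORT B =====
-- the hand-written 'while lo < hi' binary search of Source B, step for step;
-- the fuel argument (hi - lo at the call site) only makes the loop total
def qtSearchF (tills : List Int) (t : Int) : Nat → Nat → Nat → Nat
  | 0, lo, _ => lo
  | fuel + 1, lo, hi =>
    if lo < hi then
      let mid := (lo + hi) / 2
      if tills.getD mid 0 < t then qtSearchF tills t fuel (mid + 1) hi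
      else qtSearchF tills t fuel lo mid
    else lo

def qtSearch (tills : List Int) (t : Int) (lo hi : Nat) : Nat :=
  qtSearchF tills t (hi - lo) lo hi

-- body of B's customer loop: t = tills.pop(0) + c; <binary search>; tills.insert(lo, t)
def qtStepB (tills : List Int) (c : Int) : List Int :=
  match tills with
  | [] => []                 -- tills.pop(0) raises IndexError here (excluded by Pre_)
  | h :: rest =>
    let t := h + c
    let lo := qtSearch rest t 0 rest.length
    PySem.List.insert rest (lo : Int) t

def queue_time_alt (customers : List Int) (n : Int) : Int :=
  -- tills = [0] * n
  let tills0 : List Int := List.replicate n.toNat 0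
  let tills1 : List Int := customers.foldl qtStepB tills0
  -- return tills[-1]   (raises IndexError on []; excluded by Pre_)
  (PySem.List.pyGet? tills1 (-1)).getD 0

-- ===== PRECONDITION & SPEC =====
-- For n ≤ 0 both programs raise: A hits IndexError on new[0] if customers is
-- nonempty, ValueError on max([]) otherwise; B raises IndexError on tills[-1].
def Pre_queue_time (customers : List Int) (n : Int) : Prop := 1 ≤ n
instance (customers : List Int) (n : Int) : Decidable (Pre_queue_time customers n) := by unfold Pre_queue_time; infer_instance
def pvWitness_queue_time : List Int × Int := ([5, 3, 4], 2)

def Spec_queue_time (customers : List Int) (n : Int) (out : Int) : Prop := out = queue_time_alt customers n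
instance (customers : List Int) (n : Int) (out : Int) : Decidable (Spec_queue_time customers n out) := by unfold Spec_queue_time; infer_instance

-- ===== CLAIM (what is proved, stated in full; the proofs are below) =====
def Claim_equal_queue_time : Prop := ∀ (customers : List Int) (n : Int), Dom_queue_time customers n → Pre_queue_time customers n → Spec_queue_time customers n (queue_time customers n)

-- ===== LEMMAS AND PROOFS =====

-- binary-search correctness on a sorted list, by induction on the fuel
lemma qtSearchF_spec (l : List Int) (t : Int) (hp : l.Pairwise (· ≤ ·)) :
    ∀ (fuel lo hi : Nat), hi - lo ≤ fuel → lo ≤ hi → hi ≤ l.length →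
    (∀ k, k < lo → l.getD k 0 < t) →
    (∀ k, hi ≤ k → k < l.length → ¬ l.getD k 0 < t) →
    qtSearchF l t fuel lo hi ≤ l.length ∧
    (∀ k, k < qtSearchF l t fuel lo hi → l.getD k 0 < t) ∧
    (∀ k, qtSearchF l t fuel lo hi ≤ k → k < l.length → ¬ l.getD k 0 < t) := by
  intro fuel
  induction fuel with
  | zero =>
    intro lo hi hd hlohi hhil hL hR
    have hlo : lo = hi := by omega
    subst hlo
    simp only [qtSearchF]
    exact ⟨by omega, fun k hk => hL k hk, hR⟩
  | succ fuel ih =>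
    intro lo hi hd hlohi hhil hL hR
    rw [qtSearchF]
    by_cases h : lo < hi
    · simp only [h, if_true]
      have hml : (lo + hi) / 2 < l.length := by omega
      by_cases hc : l.getD ((lo + hi) / 2) 0 < t
      · simp only [hc, if_true]
        refine ih _ _ (by omega) (by omega) hhil ?_ hR
        intro k hk
        by_cases hk' : k < lo
        · exact hL k hk'
        · have hkl : k < l.length := by omega
          have hle : l.getD k 0 ≤ l.getD ((lo + hi) / 2) 0 := by
            rcases Nat.lt_or_ge k ((lo + hi) / 2) with hlt | hge
            · have := List.pairwise_iff_getElem.mp hp k ((lo + hi) / 2) hkl hml hlt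
              rwa [List.getD_eq_getElem l 0 hkl, List.getD_eq_getElem l 0 hml]
            · have : k = (lo + hi) / 2 := by omega
              simp [this]
          exact lt_of_le_of_lt hle hc
      · simp only [hc, if_false]
        refine ih _ _ (by omega) (by omega) (by omega) hL ?_
        intro k hk hkl
        by_cases hk' : hi ≤ k
        · exact hR k hk' hkl
        · have hle : l.getD ((lo + hi) / 2) 0 ≤ l.getD k 0 := by
            rcases Nat.lt_or_ge ((lo + hi) / 2) k with hlt | hge
            · have := List.pairwise_iff_getElem.mp hp ((lo + hi) / 2) k hml hkl hlt
              rwa [List.getD_eq_getElem l 0 hkl, List.getD_eq_getElem l 0 hml]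
            · have : k = (lo + hi) / 2 := by omega
              simp [this]
          omega
    · simp only [h, if_false]
      have : lo = hi := by omega
      subst this
      exact ⟨by omega, fun k hk => hL k hk, hR⟩

-- what one B-step does to a sorted till list
lemma qtStepB_cons (h c : Int) (rest : List Int) (hp : rest.Pairwise (· ≤ ·)) :
    (qtStepB (h :: rest) c).Perm ((h + c) :: rest) ∧ (qtStepB (h :: rest) c).Pairwise (· ≤ ·) := by
  have hspec : qtSearch rest (h + c) 0 rest.length ≤ rest.length ∧
      (∀ k, k < qtSearch rest (h + c) 0 rest.length → rest.getD k 0 < h + c) ∧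
      (∀ k, qtSearch rest (h + c) 0 rest.length ≤ k → k < rest.length →
        ¬ rest.getD k 0 < h + c) :=
    qtSearchF_spec rest (h + c) hp (rest.length - 0) 0 rest.length
      le_rfl (Nat.zero_le _) le_rfl (fun k hk => absurd hk (Nat.not_lt_zero k))
      (fun k hk hkl => absurd (lt_of_le_of_lt hk hkl) (lt_irrefl _))
  obtain ⟨hple, hL, hR⟩ := hspec
  set p := qtSearch rest (h + c) 0 rest.length with hpdef
  have hins : qtStepB (h :: rest) c = rest.take p ++ (h + c) :: rest.drop p := by
    show PySem.List.insert rest (p : Int) (h + c) = _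
    exact PySem.List.insert_natCast rest p (h + c) hple
  have htake : ∀ a ∈ rest.take p, a < h + c := by
    intro a ha
    obtain ⟨i, hi, hia⟩ := List.mem_iff_getElem.mp ha
    have hi' : i < p ∧ i < rest.length := by
      have := hi; rw [List.length_take] at this; omega
    have : (rest.take p)[i] = rest[i] := List.getElem_take
    rw [this] at hia
    have := hL i hi'.1
    rwa [List.getD_eq_getElem rest 0 hi'.2, hia] at this
  have hdrop : ∀ b ∈ rest.drop p, h + c ≤ b := by
    intro b hb
    obtain ⟨j, hj, hjb⟩ := List.mem_iff_getElem.mp hb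
    have hj' : p + j < rest.length := by
      have := hj; rw [List.length_drop] at this; omega
    have : (rest.drop p)[j] = rest[p + j] := List.getElem_drop ..
    rw [this] at hjb
    have := hR (p + j) (Nat.le_add_right _ _) hj'
    rw [List.getD_eq_getElem rest 0 hj', hjb] at this
    omega
  constructor
  · rw [hins]
    have := List.perm_middle (a := h + c) (l₁ := rest.take p) (l₂ := rest.drop p)
    rwa [List.take_append_drop] at this
  · rw [hins]
    refine List.pairwise_append.mpr ⟨hp.take, ?_, ?_⟩
    · refine List.pairwise_cons.mpr ⟨hdrop, hp.drop⟩
    · intro a ha b hb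
      rcases List.mem_cons.mp hb with rfl | hb'
      · exact le_of_lt (htake a ha)
      · exact le_trans (le_of_lt (htake a ha)) (hdrop b hb')

-- the loop invariant: A's state is a permutation of B's state, B's state is sorted
lemma qt_loop (customers : List Int) :
    ∀ (a b : List Int), a.Perm b → b.Pairwise (· ≤ ·) →
    (customers.foldl qtStepA a).Perm (customers.foldl qtStepB b) ∧
    (customers.foldl qtStepB b).Pairwise (· ≤ ·) ∧
    (customers.foldl qtStepB b).length = b.length := by
  induction customers with
  | nil => exact fun a b hperm hs => ⟨hperm, hs, rfl⟩
  | cons c cs ih =>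
    intro a b hperm hs
    simp only [List.foldl_cons]
    cases b with
    | nil =>
      have ha : a = [] := List.Perm.eq_nil hperm
      subst ha
      have hA : qtStepA [] c = [] := by simp [qtStepA, List.mergeSort_nil]
      have hB : qtStepB [] c = [] := rfl
      rw [hA, hB]
      exact ih [] [] (List.Perm.refl _) List.Pairwise.nil
    | cons h rest =>
      have hrest : rest.Pairwise (· ≤ ·) := List.Pairwise.of_cons hs
      have hsorted_eq : a.mergeSort (fun x y => decide (x ≤ y)) = h :: rest := by
        refine List.Perm.eq_of_pairwise (le := (· ≤ · : Int → Int → Prop))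
          (fun a b _ _ hab hba => le_antisymm hab hba) ?_ hs
          ((List.mergeSort_perm a _).trans hperm)
        have := List.pairwise_mergeSort (le := fun x y : Int => decide (x ≤ y))
          (fun a b c hab hbc => by simpa using le_trans (by simpa using hab) (by simpa using hbc))
          (fun a b => by simpa using le_total a b) a
        exact this.imp (fun hxy => by simpa using hxy)
      have hA : qtStepA a c = (h + c) :: rest := by
        rw [qtStepA, hsorted_eq]
      obtain ⟨hBperm, hBsorted⟩ := qtStepB_cons h c rest hrest
      have hlen : (qtStepB (h :: rest) c).length = (h :: rest).length := by
        rw [hBperm.length_eq]; simp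
      obtain ⟨p1, p2, p3⟩ := ih (qtStepA a c) (qtStepB (h :: rest) c)
        (by rw [hA]; exact hBperm.symm) hBsorted
      exact ⟨p1, p2, p3.trans hlen⟩

-- in a ≤-sorted list every element is at most the last one
lemma pairwise_le_getLast (l : List Int) (hne : l ≠ []) (hp : l.Pairwise (· ≤ ·)) :
    ∀ x ∈ l, x ≤ l.getLast hne := by
  induction l with
  | nil => exact absurd rfl hne
  | cons a m ih =>
    intro x hx
    cases m with
    | nil => simp at hx; simp [hx, List.getLast]
    | cons b m' =>
      rw [List.getLast_cons (by simp)]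
      rcases List.mem_cons.mp hx with rfl | hx'
      · exact List.rel_of_pairwise_cons hp (List.getLast_mem _)
      · exact ih (by simp) (List.Pairwise.of_cons hp) x hx'

-- ===== VERDICT (by name: the statement is the Claim_ definition above) =====
theorem queue_time_spec : Claim_equal_queue_time := by
  intro customers n _ hpre
  unfold Spec_queue_time queue_time queue_time_alt
  have hfold : ∀ (l : List Int) (acc : List Int),
      l.foldl (fun acc _ => (0 : Int) :: acc) acc = List.replicate l.length 0 ++ acc := by
    intro l
    induction l with
    | nil => intro acc; simp
    | cons x xs ih =>
      intro acc
      simp only [List.foldl_cons, List.length_cons, ih]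
      rw [List.replicate_succ']
      simp
  have hinit : ((PySem.List.pyRange 0 n 1).foldl (fun acc _ => (0 : Int) :: acc) []).reverse
      = List.replicate n.toNat 0 := by
    rw [hfold, PySem.List.length_pyRange_one]
    simp
  rw [hinit]
  have hpre' : (1 : Int) ≤ n := hpre
  obtain ⟨hperm, hs, hlen⟩ := qt_loop customers (List.replicate n.toNat 0)
    (List.replicate n.toNat 0) (List.Perm.refl _) (List.pairwise_replicate_of_refl)
  set B1 := customers.foldl qtStepB (List.replicate n.toNat 0) with hB1
  have hnN : 1 ≤ n.toNat := by omega
  have hne : B1 ≠ [] := by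
    intro hb
    rw [hb] at hlen
    simp at hlen
    omega
  have hA1ne : customers.foldl qtStepA (List.replicate n.toNat 0) ≠ [] :=
    fun hb => hne (List.Perm.eq_nil (hb ▸ hperm).symm)
  obtain ⟨x, tl, hxt⟩ := List.exists_cons_of_ne_nil hA1ne
  obtain ⟨m, hm⟩ : ∃ m, PySem.List.max? (customers.foldl qtStepA (List.replicate n.toNat 0)) (fun x => x) = some m :=
    ⟨tl.foldl max x, by rw [hxt]; exact PySem.List.max?_id_cons ..⟩
  have hmem : m ∈ B1 := hperm.mem_iff.mp (PySem.List.max?_mem hm)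
  have hlast : m ≤ B1.getLast hne := pairwise_le_getLast B1 hne hs m hmem
  have hmax : B1.getLast hne ≤ m :=
    PySem.List.max?_isMax hm _ (hperm.mem_iff.mpr (List.getLast_mem hne))
  have hget : PySem.List.pyGet? B1 (-1) = some (B1.getLast hne) := by
    rw [PySem.List.pyGet?_neg_one, List.getLast?_eq_some_getLast]
  show (PySem.List.max? (customers.foldl qtStepA (List.replicate n.toNat 0)) (fun x => x)).getD 0
      = (PySem.List.pyGet? B1 (-1)).getD 0
  rw [hm, hget]
  simp only [Option.getD_some]
  omega
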